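-- pv_equiv track=rewrite | github.com/Timoth26/Data-extraction-system-from-disk-images | social_analyze.py | count_hosts_by_browser
-- ===== SOURCE A (Python) =====
-- def count_hosts_by_browser(results):
--     host_counts = {}
--
--     for result in results:
--         browser = result["browser"]
--         host = result["host"]
--
--         if browser not in host_counts:
--             host_counts[browser] = {}
--
--         if host not in host_counts[browser]:
--             host_counts[browser][host] = 0
--
--         host_counts[browser][host] += 1
--
--     return host_counts
-- ===== SOURCE B (Python) =====
-- def count_hosts_by_browser(results):
--     # Pass 1: group the hosts by browser, in order of first appearance.
--     groups = {}
--     for result in results: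
--         groups.setdefault(result["browser"], []).append(result["host"])
--
--     # Pass 2: tally each browser's host list into a plain {host: count} dict.
--     counts = {}
--     for browser, hosts in groups.items():
--         tally = {}
--         for host in hosts:
--             tally[host] = tally.get(host, 0) + 1
--         counts[browser] = tally
--     return counts
-- ===== Notes on version B (the rewrite author's own statement) =====
-- stated objective: alternative
-- what changed: Replaces A's single incremental loop (nested membership tests and per-record increment on the nested dict) by a group-then-count decomposition: one pass groups hosts per browser with setdefault/append, a second pass tallies each group's host list into its count dict.
import Mathlib
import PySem

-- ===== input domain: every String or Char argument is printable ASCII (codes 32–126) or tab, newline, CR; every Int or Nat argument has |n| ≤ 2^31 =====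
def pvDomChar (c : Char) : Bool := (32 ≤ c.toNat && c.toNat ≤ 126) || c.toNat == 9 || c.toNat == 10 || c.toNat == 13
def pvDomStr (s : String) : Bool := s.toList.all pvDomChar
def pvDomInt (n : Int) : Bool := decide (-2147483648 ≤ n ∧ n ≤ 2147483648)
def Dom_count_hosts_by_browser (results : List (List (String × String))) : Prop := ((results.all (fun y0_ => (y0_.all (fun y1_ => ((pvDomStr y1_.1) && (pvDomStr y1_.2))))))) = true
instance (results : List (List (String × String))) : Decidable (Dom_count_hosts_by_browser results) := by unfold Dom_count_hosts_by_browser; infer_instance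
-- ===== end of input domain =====

-- B replaces A's incremental per-record counting loop by a group-hosts-per-browser pass
-- followed by a separate tallying pass (objective: alternative decomposition, same cost).


-- ===== PORT A =====
-- A: one loop; per record, ensure the browser's dict and the host's entry exist, then increment.
def count_hosts_by_browser (results : List (List (String × String))) : List (String × List (String × Int)) :=
  let host_counts : PySem.Dict String (PySem.Dict String Int) :=
    results.foldl (fun host_counts result =>
      let browser := ((PySem.Dict.mk result).get? "browser").getD ""
      let host := ((PySem.Dict.mk result).get? "host").getD ""
      let host_counts := if host_counts.contains browser then host_counts
                         else host_counts.insert browser PySem.Dict.empty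
      let inner := host_counts.getD browser PySem.Dict.empty
      let inner := if inner.contains host then inner else inner.insert host 0
      host_counts.insert browser (inner.insert host (inner.getD host 0 + 1)))
      PySem.Dict.empty
  host_counts.items.map (fun p => (p.1, p.2.items))

-- ===== PORT B =====
-- B: pass 1 groups hosts per browser; pass 2 tallies each group into its count dict.
def count_hosts_by_browser_alt (results : List (List (String × String))) : List (String × List (String × Int)) :=
  let groups : PySem.Dict String (List String) :=
    results.foldl (fun groups result =>
      groups.modify (((PySem.Dict.mk result).get? "browser").getD "") []
        (fun hs => hs ++ [((PySem.Dict.mk result).get? "host").getD ""]))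
      PySem.Dict.empty
  let counts : PySem.Dict String (PySem.Dict String Int) :=
    groups.items.foldl (fun counts p =>
      counts.insert p.1 (p.2.foldl (fun tally host => tally.modify host 0 (· + 1)) PySem.Dict.empty))
      PySem.Dict.empty
  counts.items.map (fun p => (p.1, p.2.items))

-- ===== PRECONDITION & SPEC =====
-- Pre_ excludes exactly the records lacking a "browser" or "host" key, where Python A raises KeyError.
def Pre_count_hosts_by_browser (results : List (List (String × String))) : Prop :=
  ∀ r ∈ results, (PySem.Dict.mk r).contains "browser" = true ∧ (PySem.Dict.mk r).contains "host" = true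
instance (results : List (List (String × String))) : Decidable (Pre_count_hosts_by_browser results) := by unfold Pre_count_hosts_by_browser; infer_instance
def pvWitness_count_hosts_by_browser : (List (List (String × String))) :=
  [[("browser", "firefox"), ("host", "a.com")], [("browser", "chrome"), ("host", "a.com")]]

def Spec_count_hosts_by_browser (results : List (List (String × String))) (out : List (String × List (String × Int))) : Prop := out = count_hosts_by_browser_alt results
instance (results : List (List (String × String))) (out : List (String × List (String × Int))) : Decidable (Spec_count_hosts_by_browser results out) := by unfold Spec_count_hosts_by_browser; infer_instance

-- ===== CLAIM (what is proved, stated in full; the proofs are below) =====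
def Claim_equal_count_hosts_by_browser : Prop := ∀ (results : List (List (String × String))), Dom_count_hosts_by_browser results → Pre_count_hosts_by_browser results → Spec_count_hosts_by_browser results (count_hosts_by_browser results)

-- ===== LEMMAS AND PROOFS =====

-- field extraction shared by the two step lemmas (definitionally the ports' inline lookups)
def pvBro (r : List (String × String)) : String := ((PySem.Dict.mk r).get? "browser").getD ""
def pvHst (r : List (String × String)) : String := ((PySem.Dict.mk r).get? "host").getD ""

-- map a function over the values of a dict, keeping the item list's order
def pvMapVals {ν ν' : Type} (f : ν → ν') (d : PySem.Dict String ν) : PySem.Dict String ν' :=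
  PySem.Dict.mk (d.items.map (fun p => (p.1, f p.2)))

theorem pv_items_mapVals {ν ν' : Type} (f : ν → ν') (d : PySem.Dict String ν) :
    (pvMapVals f d).items = d.items.map (fun p => (p.1, f p.2)) := rfl

theorem pv_get?_mapVals {ν ν' : Type} (f : ν → ν') (d : PySem.Dict String ν) (k : String) :
    (pvMapVals f d).get? k = (d.get? k).map f := by
  obtain ⟨l⟩ := d
  induction l with
  | nil => rfl
  | cons p l ih =>
    obtain ⟨pk, pv⟩ := p
    simp only [pvMapVals, List.map_cons, PySem.Dict.get?_mk_cons] at *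
    by_cases h : pk == k <;> simp [h, ih]

theorem pv_contains_mapVals {ν ν' : Type} (f : ν → ν') (d : PySem.Dict String ν) (k : String) :
    (pvMapVals f d).contains k = d.contains k := by
  rw [PySem.Dict.contains_eq_isSome_get?, PySem.Dict.contains_eq_isSome_get?, pv_get?_mapVals]
  cases d.get? k <;> rfl

theorem pv_mapVals_insert {ν ν' : Type} (f : ν → ν') (d : PySem.Dict String ν) (k : String) (v : ν) :
    pvMapVals f (d.insert k v) = (pvMapVals f d).insert k (f v) := by
  apply PySem.Dict.ext
  rw [pv_items_mapVals, PySem.Dict.items_insert, PySem.Dict.items_insert, pv_contains_mapVals,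
    pv_items_mapVals]
  by_cases h : d.contains k
  · simp only [h, if_true, List.map_map]
    refine List.map_congr_left fun p _ => ?_
    by_cases hk : p.1 = k <;> simp [hk]
  · simp [h]

-- definitional unfolding of Dict.modify, for rewriting
theorem pv_modify_eq {ν : Type} (d : PySem.Dict String ν) (k : String) (d0 : ν) (f : ν → ν) :
    d.modify k d0 f = d.insert k (f (d.getD k d0)) := rfl

theorem pv_getD_mapVals_counter (G : PySem.Dict String (List String)) (b : String) :
    (pvMapVals PySem.Dict.counter G).getD b PySem.Dict.empty = PySem.Dict.counter (G.getD b []) := by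
  rw [PySem.Dict.getD_eq_get?_getD, PySem.Dict.getD_eq_get?_getD, pv_get?_mapVals]
  cases G.get? b <;> rfl

-- A's loop body, rewritten: on (b, h) it is exactly 'insert b (modify h 0 (+1) of the inner dict)'
theorem pv_stepA_eq (d : PySem.Dict String (PySem.Dict String Int)) (b h : String) :
    (let d' := if d.contains b then d else d.insert b PySem.Dict.empty
     let inner := d'.getD b PySem.Dict.empty
     let inner := if inner.contains h then inner else inner.insert h 0
     d'.insert b (inner.insert h (inner.getD h 0 + 1))) =
    d.insert b ((d.getD b PySem.Dict.empty).modify h 0 (· + 1)) := by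
  dsimp only
  by_cases hb : d.contains b
  · rw [if_pos hb]
    by_cases hh : (d.getD b PySem.Dict.empty).contains h
    · rw [if_pos hh]; rfl
    · rw [if_neg hh, PySem.Dict.getD_insert_self, PySem.Dict.insert_insert_self,
        pv_modify_eq,
        PySem.Dict.getD_of_not_contains (d.getD b PySem.Dict.empty) (k := h) 0 (by simpa using hh)]
  · rw [if_neg hb, PySem.Dict.getD_insert_self,
      if_neg (show ¬(PySem.Dict.empty : PySem.Dict String Int).contains h = true by simp),
      PySem.Dict.getD_insert_self, PySem.Dict.insert_insert_self, PySem.Dict.insert_insert_self,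
      pv_modify_eq, PySem.Dict.getD_of_not_contains _ _ (by simpa using hb), PySem.Dict.getD_empty]

-- one grouping step corresponds, through counter, to one step of A's loop
theorem pv_step_corr (G : PySem.Dict String (List String)) (b h : String) :
    (pvMapVals PySem.Dict.counter G).insert b
      (((pvMapVals PySem.Dict.counter G).getD b PySem.Dict.empty).modify h 0 (· + 1)) =
    pvMapVals PySem.Dict.counter (G.modify b [] (fun hs => hs ++ [h])) := by
  rw [pv_getD_mapVals_counter, ← PySem.Dict.counter_append_singleton, ← pv_mapVals_insert]
  rfl

-- loop invariant: A's accumulator is always 'counter' mapped over B's grouping accumulator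
theorem pv_fold_corr (l : List (List (String × String))) :
    ∀ G : PySem.Dict String (List String),
      l.foldl (fun d r =>
        let d' := if d.contains (pvBro r) then d else d.insert (pvBro r) PySem.Dict.empty
        let inner := d'.getD (pvBro r) PySem.Dict.empty
        let inner := if inner.contains (pvHst r) then inner else inner.insert (pvHst r) 0
        d'.insert (pvBro r) (inner.insert (pvHst r) (inner.getD (pvHst r) 0 + 1)))
        (pvMapVals PySem.Dict.counter G) =
      pvMapVals PySem.Dict.counter
        (l.foldl (fun g r => g.modify (pvBro r) [] (fun hs => hs ++ [pvHst r])) G) := by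
  induction l with
  | nil => intro G; rfl
  | cons r l ih =>
    intro G
    simp only [List.foldl_cons]
    rw [pv_stepA_eq, pv_step_corr, ih]

-- B's second pass: inserting fresh distinct keys into an empty dict appends the tallied items
theorem pv_counts_items (l : List (String × List String)) (hnd : (l.map (fun p => p.1)).Nodup) :
    (l.foldl (fun counts p =>
        counts.insert p.1 (p.2.foldl (fun tally host => tally.modify host 0 (· + 1)) PySem.Dict.empty))
      PySem.Dict.empty).items =
    l.map (fun p => (p.1, PySem.Dict.counter p.2)) := by
  have h := PySem.Dict.items_foldl_insert_fresh l (fun p => p.1)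
    (fun p => p.2.foldl (fun tally host => tally.modify host 0 (· + 1))
      (PySem.Dict.empty : PySem.Dict String Int))
    PySem.Dict.empty (fun a _ => PySem.Dict.contains_empty a.1) hnd
  simpa [PySem.Dict.counter_eq_foldl] using h

theorem count_hosts_by_browser_eq_alt (results : List (List (String × String))) :
    count_hosts_by_browser results = count_hosts_by_browser_alt results := by
  unfold count_hosts_by_browser count_hosts_by_browser_alt
  dsimp only
  have hfold := pv_fold_corr results PySem.Dict.empty
  simp only [pvBro, pvHst] at hfold
  rw [show (pvMapVals PySem.Dict.counter PySem.Dict.empty :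
        PySem.Dict String (PySem.Dict String Int)) = PySem.Dict.empty from rfl] at hfold
  rw [hfold]
  set G := results.foldl (fun g r =>
      g.modify (((PySem.Dict.mk r).get? "browser").getD "") []
        (fun hs => hs ++ [((PySem.Dict.mk r).get? "host").getD ""])) PySem.Dict.empty with hG
  have hnd : (G.items.map (fun p => p.1)).Nodup := by
    have : G.keys.Nodup := by
      rw [hG]
      exact PySem.Dict.nodup_keys_foldl_modify_key results
        (fun r => ((PySem.Dict.mk r).get? "browser").getD "") []
        (fun _ r => fun hs => hs ++ [((PySem.Dict.mk r).get? "host").getD ""])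
        PySem.Dict.empty PySem.Dict.nodup_keys_empty
    simpa [PySem.Dict.keys] using this
  rw [pv_counts_items G.items hnd, pv_items_mapVals, List.map_map]

-- ===== VERDICT (by name: the statement is the Claim_ definition above) =====
theorem count_hosts_by_browser_spec : Claim_equal_count_hosts_by_browser := by
  intro results _ _
  exact count_hosts_by_browser_eq_alt results
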